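-- pv_equiv track=rewrite | github.com/PreetThakkar/HandsOn | MIT/PS2/hangman.py | match_with_gaps
-- ===== SOURCE A (Python) =====
-- def match_with_gaps(my_word, other_word):
--     # FILL IN YOUR CODE HERE AND DELETE "pass"
--     if len(other_word) != len(my_word.replace(" ", "")):
--         return False
--     else:
--         for i in range(len(other_word)):
--             my_word = my_word.replace(" ", "")
--             if my_word[i] != "_" and my_word[i] != other_word[i]:
--                 return False
--             elif my_word[i] == "_":
--                 continue
--         return True
-- ===== SOURCE B (Python) =====
-- def match_with_gaps(my_word, other_word):
--     j = 0
--     for c in my_word: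
--         if c == " ":
--             continue
--         if j >= len(other_word):
--             return False
--         if c != "_" and c != other_word[j]:
--             return False
--         j += 1
--     return j == len(other_word)
-- ===== Notes on version B (the rewrite author's own statement) =====
-- stated objective: faster
-- what changed: Replace A's strip-then-length-check-then-index-loop (which re-strips the whole word on every iteration) by a single fused two-pointer pass over my_word with a cursor into other_word, skipping spaces inline and checking exhaustion at the end.
import Mathlib
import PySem

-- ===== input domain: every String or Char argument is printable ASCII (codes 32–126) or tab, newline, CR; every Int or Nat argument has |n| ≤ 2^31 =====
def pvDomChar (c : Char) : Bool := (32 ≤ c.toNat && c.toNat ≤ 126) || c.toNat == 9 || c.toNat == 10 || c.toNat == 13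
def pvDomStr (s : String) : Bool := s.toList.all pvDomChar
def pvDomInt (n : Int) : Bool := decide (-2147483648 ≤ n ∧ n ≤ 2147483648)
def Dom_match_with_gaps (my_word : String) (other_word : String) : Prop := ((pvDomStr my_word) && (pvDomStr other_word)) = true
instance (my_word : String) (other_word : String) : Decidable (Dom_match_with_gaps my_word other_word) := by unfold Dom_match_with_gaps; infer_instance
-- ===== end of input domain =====

-- B is a single fused two-pointer pass over my_word with a cursor into other_word
-- (spaces skipped inline, exhaustion checked at the end); A strips spaces and
-- re-strips on every iteration of an index loop guarded by a length check.

-- ===== PORT A =====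
-- A's loop: `my_word` is reassigned to its space-stripped form on EVERY iteration, as in A;
-- the `none` indexing case is unreachable (the length guard makes i in range for both strings).
def matchLoopA (mw ow : List Char) (n i : Nat) : Bool :=
  if _h : i < n then
    let mw' := PySem.Chars.replace mw [' '] []
    match mw'[i]?, ow[i]? with
    | some c, some d =>
        if c ≠ '_' ∧ c ≠ d then false
        else matchLoopA mw' ow n (i + 1)
    | _, _ => false
  else true
  termination_by n - i

def match_with_gaps (my_word : String) (other_word : String) : Bool :=
  if other_word.toList.length ≠ (PySem.Chars.replace my_word.toList [' '] []).length then
    false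
  else
    matchLoopA my_word.toList other_word.toList other_word.toList.length 0

-- ===== PORT B =====
-- Source B's loop over my_word's characters with cursor j into other_word;
-- the guard `ow.length ≤ j` makes the ow[j] access in range, `getD` is exact there.
def matchLoopB (ow : List Char) : List Char → Nat → Bool
  | [], j => decide (j = ow.length)
  | c :: p, j =>
    if c = ' ' then matchLoopB ow p j
    else if ow.length ≤ j then false
    else if c ≠ '_' ∧ c ≠ ow.getD j ' ' then false
    else matchLoopB ow p (j + 1)

def match_with_gaps_alt (my_word : String) (other_word : String) : Bool :=
  matchLoopB other_word.toList my_word.toList 0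

-- ===== PRECONDITION & SPEC =====
def Spec_match_with_gaps (my_word : String) (other_word : String) (out : Bool) : Prop := out = match_with_gaps_alt my_word other_word
instance (my_word : String) (other_word : String) (out : Bool) : Decidable (Spec_match_with_gaps my_word other_word out) := by unfold Spec_match_with_gaps; infer_instance

-- ===== CLAIM (what is proved, stated in full; the proofs are below) =====
def Claim_equal_match_with_gaps : Prop := ∀ (my_word : String) (other_word : String), Dom_match_with_gaps my_word other_word → Spec_match_with_gaps my_word other_word (match_with_gaps my_word other_word)

-- ===== LEMMAS AND PROOFS =====

-- replacing " " by "" is filtering spaces out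
theorem replace_go_space (fuel : Nat) : ∀ (l acc : List Char), l.length ≤ fuel →
    PySem.Chars.replace.go [' '] [] fuel l acc = acc.reverse ++ l.filter (· ≠ ' ') := by
  induction fuel with
  | zero =>
      intro l acc h
      have : l = [] := List.eq_nil_of_length_eq_zero (Nat.le_zero.mp h)
      subst this
      simp [PySem.Chars.replace.go]
  | succ fuel ih =>
      intro l acc h
      cases l with
      | nil => simp [PySem.Chars.replace.go]
      | cons c t =>
          by_cases hc : c = ' '
          · subst hc
            have hp : List.isPrefixOf [' '] (' ' :: t) = true := by
              simp [List.isPrefixOf]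
            rw [PySem.Chars.replace.go]
            simp only [hp, if_true, List.length_cons, List.length_nil, List.drop_succ_cons,
              List.drop_zero, List.reverse_nil, List.nil_append]
            rw [ih t acc (by simpa using Nat.le_of_succ_le_succ h)]
            simp
          · have hp : List.isPrefixOf [' '] (c :: t) = false := by
              simp [List.isPrefixOf]
              exact fun hh => hc hh.symm
            rw [PySem.Chars.replace.go]
            simp only [hp, Bool.false_eq_true, if_false]
            rw [ih t (c :: acc) (by simpa using Nat.le_of_succ_le_succ h)]
            simp [hc]

theorem replace_space_eq_filter (cs : List Char) :
    PySem.Chars.replace cs [' '] [] = cs.filter (· ≠ ' ') := by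
  rw [PySem.Chars.replace]
  rw [if_neg (by simp)]
  exact replace_go_space cs.length cs [] (le_refl _)

-- common specification both loops are reduced to: the stripped pattern, length-matched
-- and compared pointwise against the suffix of ow
def pointSpec (ow s : List Char) (j : Nat) : Bool :=
  decide (s.length + j = ow.length) &&
    (s.zip (ow.drop j)).all (fun p => p.1 == '_' || p.1 == p.2)

-- A's index-loop equals pointSpec of the stripped word (under the length guard)
theorem matchLoopA_eq (k : Nat) : ∀ (mw ow : List Char) (i : Nat),
    (mw.filter (· ≠ ' ')).length = ow.length → k = ow.length - i →
    matchLoopA mw ow ow.length i =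
      (((mw.filter (· ≠ ' ')).drop i).zip (ow.drop i)).all (fun p => p.1 == '_' || p.1 == p.2) := by
  induction k with
  | zero =>
      intro mw ow i hlen hk
      have hi : ow.length ≤ i := by omega
      rw [matchLoopA]
      simp only [dif_neg (by omega : ¬ i < ow.length)]
      rw [List.drop_eq_nil_of_le hi, List.zip_nil_right]
      rfl
  | succ k ih =>
      intro mw ow i hlen hk
      set s := mw.filter (· ≠ ' ') with hsdef
      have hi : i < ow.length := by omega
      rw [matchLoopA]
      simp only [dif_pos hi]
      rw [replace_space_eq_filter, ← hsdef]
      have hsi : i < s.length := by omega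
      rw [List.getElem?_eq_getElem hsi, List.getElem?_eq_getElem hi]
      have hdrop : s.drop i = s[i] :: s.drop (i + 1) := List.drop_eq_getElem_cons hsi
      have hdrop2 : ow.drop i = ow[i] :: ow.drop (i + 1) := List.drop_eq_getElem_cons hi
      rw [hdrop, hdrop2, List.zip_cons_cons, List.all_cons]
      have hfs : s.filter (· ≠ ' ') = s := by
        rw [hsdef, List.filter_filter]; simp
      have hrec := ih s ow (i + 1) (by rw [hfs]; omega) (by omega)
      rw [hfs] at hrec
      rw [hrec]
      show (if s[i] ≠ '_' ∧ s[i] ≠ ow[i] then false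
            else ((List.drop (i + 1) s).zip (List.drop (i + 1) ow)).all fun p => p.1 == '_' || p.1 == p.2)
          = ((s[i] == '_' || s[i] == ow[i]) &&
             ((List.drop (i + 1) s).zip (List.drop (i + 1) ow)).all fun p => p.1 == '_' || p.1 == p.2)
      by_cases hb : s[i] ≠ '_' ∧ s[i] ≠ ow[i]
      · rw [if_pos hb]
        have : (s[i] == '_' || s[i] == ow[i]) = false := by
          simp only [Bool.or_eq_false_iff, beq_eq_false_iff_ne]
          exact hb
        rw [this, Bool.false_and]
      · rw [if_neg hb]
        have : (s[i] == '_' || s[i] == ow[i]) = true := by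
          rw [not_and_or, not_not, not_not] at hb
          rcases hb with h | h <;> simp [h]
        rw [this, Bool.true_and]

-- B's two-pointer loop equals pointSpec of the stripped pattern (for every cursor j)
theorem matchLoopB_eq (ow : List Char) : ∀ (p : List Char) (j : Nat),
    matchLoopB ow p j = pointSpec ow (p.filter (· ≠ ' ')) j := by
  intro p
  induction p with
  | nil =>
      intro j
      simp [matchLoopB, pointSpec]
  | cons c t ih =>
      intro j
      by_cases hc : c = ' '
      · subst hc
        rw [matchLoopB, if_pos rfl, ih]
        simp [pointSpec]
      · rw [matchLoopB, if_neg hc]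
        have hf : (c :: t).filter (· ≠ ' ') = c :: t.filter (· ≠ ' ') := by
          simp [hc]
        rw [hf]
        by_cases hj : ow.length ≤ j
        · rw [if_pos hj]
          unfold pointSpec
          have : ¬ ((c :: t.filter (· ≠ ' ')).length + j = ow.length) := by
            simp only [List.length_cons]; omega
          rw [decide_eq_false this, Bool.false_and]
        · rw [if_neg hj]
          have hjlt : j < ow.length := by omega
          have hget : ow.getD j ' ' = ow[j] := by
            simp [List.getD, List.getElem?_eq_getElem hjlt]
          have hdrop : ow.drop j = ow[j] :: ow.drop (j + 1) := List.drop_eq_getElem_cons hjlt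
          by_cases hb : c ≠ '_' ∧ c ≠ ow.getD j ' '
          · rw [if_pos hb]
            unfold pointSpec
            rw [hdrop, List.zip_cons_cons, List.all_cons]
            have : (c == '_' || c == ow[j]) = false := by
              rw [hget] at hb
              simp only [Bool.or_eq_false_iff, beq_eq_false_iff_ne]
              exact hb
            rw [this]
            simp
          · rw [if_neg hb, ih]
            unfold pointSpec
            rw [hdrop, List.zip_cons_cons, List.all_cons]
            have hok : (c == '_' || c == ow[j]) = true := by
              rw [hget] at hb
              rw [not_and_or, not_not, not_not] at hb
              rcases hb with h | h <;> simp [h]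
            rw [hok, Bool.true_and]
            have hpe : (decide ((t.filter (· ≠ ' ')).length + (j + 1) = ow.length) : Bool) =
                decide ((c :: t.filter (· ≠ ' ')).length + j = ow.length) := by
              simp only [List.length_cons, decide_eq_decide]; omega
            rw [hpe]

-- ===== VERDICT (by name: the statement is the Claim_ definition above) =====
theorem match_with_gaps_spec : Claim_equal_match_with_gaps := by
  intro my_word other_word _
  unfold Spec_match_with_gaps match_with_gaps match_with_gaps_alt
  rw [matchLoopB_eq, replace_space_eq_filter]
  set s := my_word.toList.filter (· ≠ ' ') with hsdef
  by_cases hlen : s.length = other_word.toList.length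
  · rw [if_neg (by omega)]
    rw [matchLoopA_eq other_word.toList.length my_word.toList other_word.toList 0 hlen (by omega)]
    unfold pointSpec
    rw [← hsdef]
    simp only [List.drop_zero]
    rw [decide_eq_true (by omega), Bool.true_and]
  · rw [if_pos (by omega)]
    unfold pointSpec
    rw [decide_eq_false (by omega), Bool.false_and]
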